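-- pv_equiv track=rewrite | github.com/atharvnanda/epaper | v3/translator.py | _build_keyed_dict
-- ===== SOURCE A (Python) =====
-- def _build_keyed_dict(blocks: list[dict]) -> dict[str, str]:
--     """
--     Build a role-indexed dict from an article's blocks.
--
--     Example output:
--       {"headline_0": "...", "subheadline_0": "...",
--        "body_0": "...", "body_1": "...", "byline_0": "..."}
--     """
--     role_counters: dict[str, int] = {}
--     keyed: dict[str, str] = {}
--
--     for blk in blocks:
--         role = blk.get("role", "body")
--         idx = role_counters.get(role, 0)
--         role_counters[role] = idx + 1
--         key = f"{role}_{idx}"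
--         keyed[key] = blk.get("text", "").strip()
--
--     return keyed
-- ===== SOURCE B (Python) =====
-- def _build_keyed_dict(blocks: list[dict]) -> dict[str, str]:
--     """Group-then-enumerate decomposition: first collect each role's block
--     positions into a grouping table, then number each group's positions with
--     enumerate to build a position -> key table, and finally emit the stripped
--     texts in original block order under those keys."""
--     positions: dict[str, list[int]] = {}
--     for pos, blk in enumerate(blocks):
--         positions.setdefault(blk.get("role", "body"), []).append(pos)
--     key_at = {pos: f"{role}_{i}"
--               for role, poss in positions.items()
--               for i, pos in enumerate(poss)}
--     return {key_at[pos]: blk.get("text", "").strip()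
--             for pos, blk in enumerate(blocks)}
-- ===== Notes on version B (the rewrite author's own statement) =====
-- stated objective: alternative
-- what changed: Replaces A's single pass with a mutable per-role counter by a staged group-then-enumerate pipeline: pass 1 groups block positions by role, pass 2 numbers each group with enumerate into a position-to-key table, pass 3 emits the stripped texts in original block order under those keys.
import Mathlib
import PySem

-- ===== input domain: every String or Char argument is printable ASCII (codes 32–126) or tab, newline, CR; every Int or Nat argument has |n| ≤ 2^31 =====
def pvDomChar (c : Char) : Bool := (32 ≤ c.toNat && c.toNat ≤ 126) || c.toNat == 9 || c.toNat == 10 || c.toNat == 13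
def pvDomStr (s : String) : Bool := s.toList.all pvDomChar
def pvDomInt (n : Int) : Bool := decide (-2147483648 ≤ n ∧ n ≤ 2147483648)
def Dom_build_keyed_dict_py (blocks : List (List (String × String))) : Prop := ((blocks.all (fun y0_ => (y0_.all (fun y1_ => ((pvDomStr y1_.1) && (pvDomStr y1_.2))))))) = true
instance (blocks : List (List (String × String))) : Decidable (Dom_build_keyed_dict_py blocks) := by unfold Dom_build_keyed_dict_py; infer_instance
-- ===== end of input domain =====

-- B replaces A's single-pass per-role counter with a staged group-then-enumerate
-- pipeline (group positions by role, number each group, emit in block order);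
-- an alternative decomposition with the same output.


-- shared helpers: blk.get("role","body"), blk.get("text","").strip(), f"{role}_{idx}"
def pvRole (blk : List (String × String)) : String := (PySem.Dict.mk blk).getD "role" "body"
def pvText (blk : List (String × String)) : String := PySem.Str.strip ((PySem.Dict.mk blk).getD "text" "")
def pvKey (r : String) (n : Int) : String := r ++ "_" ++ PySem.Int.toStr n

-- ===== PORT A =====
def build_keyed_dict_py (blocks : List (List (String × String))) : List (String × String) :=
  (blocks.foldl
    (fun (st : PySem.Dict String Int × PySem.Dict String String) blk =>
      let role := pvRole blk
      let idx := st.1.getD role 0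
      (st.1.insert role (idx + 1), st.2.insert (pvKey role idx) (pvText blk)))
    (PySem.Dict.empty, PySem.Dict.empty)).2.items

-- ===== PORT B =====
def build_keyed_dict_py_alt (blocks : List (List (String × String))) : List (String × String) :=
  -- pass 1: positions.setdefault(role, []).append(pos)
  let positions : PySem.Dict String (List Int) :=
    (PySem.List.enumerate blocks 0).foldl
      (fun d p => d.modify (pvRole p.2) [] (· ++ [p.1])) PySem.Dict.empty
  -- pass 2: key_at = {pos: f"{role}_{i}" for role, poss in positions.items() for i, pos in enumerate(poss)}
  let key_at : PySem.Dict Int String :=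
    positions.items.foldl
      (fun k rp => (PySem.List.enumerate rp.2 0).foldl
        (fun k ip => k.insert ip.2 (pvKey rp.1 ip.1)) k)
      PySem.Dict.empty
  -- pass 3: {key_at[pos]: blk.get("text","").strip() for pos, blk in enumerate(blocks)}
  -- key_at[pos] is exact as getD: every enumerated position is a key of key_at (proved below)
  ((PySem.List.enumerate blocks 0).foldl
    (fun (d : PySem.Dict String String) p => d.insert (key_at.getD p.1 "") (pvText p.2))
    PySem.Dict.empty).items

-- ===== PRECONDITION & SPEC =====
def Spec_build_keyed_dict_py (blocks : List (List (String × String))) (out : List (String × String)) : Prop := out = build_keyed_dict_py_alt blocks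
instance (blocks : List (List (String × String))) (out : List (String × String)) : Decidable (Spec_build_keyed_dict_py blocks out) := by unfold Spec_build_keyed_dict_py; infer_instance

-- ===== CLAIM (what is proved, stated in full; the proofs are below) =====
def Claim_equal_build_keyed_dict_py : Prop := ∀ (blocks : List (List (String × String))), Dom_build_keyed_dict_py blocks → Spec_build_keyed_dict_py blocks (build_keyed_dict_py blocks)

-- ===== LEMMAS AND PROOFS =====

-- A's loop step (zeta-reduced, definitionally the port's lambda)
def pvStepA (st : PySem.Dict String Int × PySem.Dict String String)
    (blk : List (String × String)) : PySem.Dict String Int × PySem.Dict String String :=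
  (st.1.insert (pvRole blk) (st.1.getD (pvRole blk) 0 + 1),
   st.2.insert (pvKey (pvRole blk) (st.1.getD (pvRole blk) 0)) (pvText blk))

-- common specification fold: insert (role_prefixcount, text) per block, in block order
def pvSpecFold : List (List (String × String)) → List String → PySem.Dict String String → PySem.Dict String String
  | [], _, k => k
  | b :: bs, pre, k =>
      pvSpecFold bs (pre ++ [pvRole b]) (k.insert (pvKey (pvRole b) (pre.count (pvRole b) : Int)) (pvText b))

-- positions of role r among xs, numbered from s (pure form of B's grouping table)
def pvGrp : List String → Int → String → List Int
  | [], _, _ => []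
  | x :: xs, s, r => if x = r then s :: pvGrp xs (s + 1) r else pvGrp xs (s + 1) r

-- B's inner numbering loop over one group
def pvInner (r : String) (poss : List Int) (i0 : Int) (k : PySem.Dict Int String) : PySem.Dict Int String :=
  (PySem.List.enumerate poss i0).foldl (fun k ip => k.insert ip.2 (pvKey r ip.1)) k

lemma pvA_main : ∀ (bs : List (List (String × String))) (pre : List String)
    (c : PySem.Dict String Int) (k : PySem.Dict String String),
    (∀ r, c.getD r 0 = (pre.count r : Int)) →
    (bs.foldl pvStepA (c, k)).2 = pvSpecFold bs pre k := by
  intro bs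
  induction bs with
  | nil => intro pre c k _; rfl
  | cons b bs ih =>
    intro pre c k hc
    simp only [List.foldl_cons, pvSpecFold]
    rw [show pvStepA (c, k) b =
      (c.insert (pvRole b) (c.getD (pvRole b) 0 + 1),
       k.insert (pvKey (pvRole b) ((pre.count (pvRole b) : Int))) (pvText b)) by
        simp [pvStepA, hc]]
    exact ih _ _ _ (by
      intro r
      rw [PySem.Dict.getD_insert]
      by_cases h : r = pvRole b
      · subst h; simp [hc, List.count_append]
      · simp [h, hc r, List.count_append, Ne.symm h])

lemma pvB_final : ∀ (K : PySem.Dict Int String) (bs : List (List (String × String)))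
    (pre : List String) (k : PySem.Dict String String),
    (∀ (i : Nat) (hi : i < bs.length),
      K.getD ((pre.length + i : Nat) : Int) "" =
        pvKey (pvRole bs[i]) (((pre ++ (bs.take i).map pvRole).count (pvRole bs[i]) : Nat) : Int)) →
    (PySem.List.enumerate bs ((pre.length : Nat) : Int)).foldl
      (fun (d : PySem.Dict String String) p => d.insert (K.getD p.1 "") (pvText p.2)) k
      = pvSpecFold bs pre k := by
  intro K bs
  induction bs with
  | nil => intro pre k _; rfl
  | cons b bs ih =>
    intro pre k hK
    rw [PySem.List.enumerate_cons, List.foldl_cons]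
    have h0 := hK 0 (by simp)
    simp only [List.getElem_cons_zero, Nat.add_zero, List.take_zero, List.map_nil,
      List.append_nil] at h0
    simp only [pvSpecFold, h0]
    have hcast : ((pre.length : Nat) : Int) + 1 = (((pre ++ [pvRole b]).length : Nat) : Int) := by
      simp
    rw [hcast]
    exact ih (pre ++ [pvRole b]) _ (by
      intro i hi
      have := hK (i + 1) (by simpa using Nat.succ_lt_succ hi)
      simpa [List.take_succ_cons, List.append_assoc, Nat.add_comm, Nat.add_left_comm,
        Nat.add_assoc] using this)

lemma pvGrp_characterize : ∀ (bs : List (List (String × String))) (s : Int) (r : String),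
    ((((PySem.List.enumerate bs s).map (fun p => (pvRole p.2, p.1))).filter
      (fun q => q.1 == r)).map (·.2)) = pvGrp (bs.map pvRole) s r := by
  intro bs
  induction bs with
  | nil => intro s r; rfl
  | cons b bs ih =>
    intro s r
    rw [PySem.List.enumerate_cons]
    simp only [List.map_cons, List.filter_cons, pvGrp]
    by_cases h : pvRole b = r
    · simp [h, ih]
    · simp [h, ih, beq_eq_false_iff_ne.mpr h]

-- keys below the window are untouched by the numbering of one group
lemma pvInner_low : ∀ (xs : List String) (s i0 : Int) (r : String) (k : PySem.Dict Int String)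
    (pos : Int), pos < s → (pvInner r (pvGrp xs s r) i0 k).get? pos = k.get? pos := by
  intro xs
  induction xs with
  | nil => intro s i0 r k pos _; rfl
  | cons x xs ih =>
    intro s i0 r k pos hlt
    simp only [pvGrp]
    by_cases h : x = r
    · rw [if_pos h]
      show (pvInner r (s :: pvGrp xs (s + 1) r) i0 k).get? pos = k.get? pos
      rw [show pvInner r (s :: pvGrp xs (s + 1) r) i0 k =
            pvInner r (pvGrp xs (s + 1) r) (i0 + 1) (k.insert s (pvKey r i0)) by
          simp [pvInner, PySem.List.enumerate_cons]]
      rw [ih (s + 1) (i0 + 1) r _ pos (by omega)]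
      exact PySem.Dict.get?_insert_of_ne _ _ (by omega)
    · rw [if_neg h]
      exact ih (s + 1) i0 r k pos (by omega)

-- what the numbering of one whole group assigns to position s + j
lemma pvInner_comb : ∀ (xs : List String) (j : Nat) (hj : j < xs.length) (s i0 : Int)
    (r : String) (k : PySem.Dict Int String),
    (pvInner r (pvGrp xs s r) i0 k).get? (s + (j : Int)) =
      if xs[j] = r then some (pvKey r (i0 + ((xs.take j).count r : Int)))
      else k.get? (s + (j : Int)) := by
  intro xs
  induction xs with
  | nil => intro j hj; exact absurd hj (by simp)
  | cons x xs ih =>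
    intro j hj s i0 r k
    simp only [pvGrp]
    by_cases h : x = r
    · rw [if_pos h]
      rw [show pvInner r (s :: pvGrp xs (s + 1) r) i0 k =
            pvInner r (pvGrp xs (s + 1) r) (i0 + 1) (k.insert s (pvKey r i0)) by
          simp [pvInner, PySem.List.enumerate_cons]]
      cases j with
      | zero =>
        simp only [Nat.cast_zero, add_zero]
        rw [pvInner_low xs (s + 1) (i0 + 1) r _ s (by omega)]
        simp [h, PySem.Dict.get?_insert_self]
      | succ j =>
        have hj' : j < xs.length := Nat.lt_of_succ_lt_succ hj
        rw [show s + ((j + 1 : Nat) : Int) = (s + 1) + (j : Int) by push_cast; ring]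
        rw [ih j hj' (s + 1) (i0 + 1) r (k.insert s (pvKey r i0))]
        by_cases hx : xs[j] = r
        · rw [if_pos hx, if_pos (show (x :: xs)[j + 1] = r by simpa using hx)]
          have hcnt : i0 + ((((x :: xs).take (j + 1)).count r : Nat) : Int)
              = i0 + 1 + (((xs.take j).count r : Nat) : Int) := by
            rw [List.take_succ_cons, List.count_cons, if_pos (by simp [h])]
            push_cast; ring
          rw [hcnt]
        · rw [if_neg hx, if_neg (show ¬ (x :: xs)[j + 1] = r by simpa using hx)]
          exact PySem.Dict.get?_insert_of_ne _ _ (by omega)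
    · rw [if_neg h]
      cases j with
      | zero =>
        simp only [Nat.cast_zero, add_zero]
        rw [pvInner_low xs (s + 1) i0 r k s (by omega)]
        simp [h]
      | succ j =>
        have hj' : j < xs.length := Nat.lt_of_succ_lt_succ hj
        rw [show s + ((j + 1 : Nat) : Int) = (s + 1) + (j : Int) by push_cast; ring]
        rw [ih j hj' (s + 1) i0 r k]
        by_cases hx : xs[j] = r
        · rw [if_pos hx, if_pos (show (x :: xs)[j + 1] = r by simpa using hx)]
          have hcnt : i0 + ((((x :: xs).take (j + 1)).count r : Nat) : Int)
              = i0 + (((xs.take j).count r : Nat) : Int) := by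
            rw [List.take_succ_cons, List.count_cons, if_neg (by simp [h])]
            simp
          rw [hcnt]
        · rw [if_neg hx, if_neg (show ¬ (x :: xs)[j + 1] = r by simpa using hx)]

-- once position j already has its intended key, correctly-grouped numbering keeps it
lemma pvOuter_stable (roles : List String) (j : Nat) (hj : j < roles.length) :
    ∀ (gs : List (String × List Int)) (k : PySem.Dict Int String),
    (∀ g ∈ gs, g.2 = pvGrp roles 0 g.1) →
    k.get? (j : Int) = some (pvKey roles[j] (((roles.take j).count roles[j] : Nat) : Int)) →
    (gs.foldl (fun k rp => pvInner rp.1 rp.2 (0 : Int) k) k).get? (j : Int) =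
      some (pvKey roles[j] (((roles.take j).count roles[j] : Nat) : Int)) := by
  intro gs
  induction gs with
  | nil => intro k _ hk; exact hk
  | cons g gs ih =>
    intro k hall hk
    rw [List.foldl_cons]
    refine ih _ (fun g' hg' => hall g' (List.mem_cons_of_mem _ hg')) ?_
    rw [hall g (List.mem_cons_self), show ((j : Int)) = (0 : Int) + (j : Int) by ring]
    rw [pvInner_comb roles j hj 0 (0 : Int) g.1 k]
    by_cases hg : roles[j] = g.1
    · rw [if_pos hg, ← hg]
      simp
    · rw [if_neg hg, show (0 : Int) + (j : Int) = ((j : Int)) by ring]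
      exact hk

-- the full position→key table assigns position j its intended key
lemma pvOuter (roles : List String) (j : Nat) (hj : j < roles.length) :
    ∀ (gs : List (String × List Int)) (k : PySem.Dict Int String),
    (∀ g ∈ gs, g.2 = pvGrp roles 0 g.1) →
    (roles[j], pvGrp roles 0 roles[j]) ∈ gs →
    (gs.foldl (fun k rp => pvInner rp.1 rp.2 (0 : Int) k) k).get? (j : Int) =
      some (pvKey roles[j] (((roles.take j).count roles[j] : Nat) : Int)) := by
  intro gs
  induction gs with
  | nil => intro k _ hmem; simp at hmem
  | cons g gs ih =>
    intro k hall hmem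
    rw [List.foldl_cons]
    by_cases hg : roles[j] = g.1
    · refine pvOuter_stable roles j hj gs _
        (fun g' hg' => hall g' (List.mem_cons_of_mem _ hg')) ?_
      rw [hall g (List.mem_cons_self), show ((j : Int)) = (0 : Int) + (j : Int) by ring]
      rw [pvInner_comb roles j hj 0 (0 : Int) g.1 k, if_pos hg, ← hg]
      simp
    · have hmem' : (roles[j], pvGrp roles 0 roles[j]) ∈ gs := by
        rcases List.mem_cons.mp hmem with h | h
        · exact absurd (congrArg Prod.fst h) hg
        · exact h
      exact ih _ (fun g' hg' => hall g' (List.mem_cons_of_mem _ hg')) hmem'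

-- B's pipeline computes the common specification fold
lemma pvB_eq (blocks : List (List (String × String))) :
    build_keyed_dict_py_alt blocks = (pvSpecFold blocks [] PySem.Dict.empty).items := by
  set posd := (PySem.List.enumerate blocks 0).foldl
      (fun d p => d.modify (pvRole p.2) [] (· ++ [p.1]))
      (PySem.Dict.empty : PySem.Dict String (List Int)) with hposd
  have hgetD : ∀ r, posd.getD r [] = pvGrp (blocks.map pvRole) 0 r := by
    intro r
    rw [hposd, show (PySem.List.enumerate blocks 0).foldl
          (fun d p => d.modify (pvRole p.2) [] (· ++ [p.1]))
          (PySem.Dict.empty : PySem.Dict String (List Int))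
        = ((PySem.List.enumerate blocks 0).map (fun p => (pvRole p.2, p.1))).foldl
          (fun d q => d.modify q.1 [] (· ++ [q.2])) PySem.Dict.empty
      from (List.foldl_map (f := fun (p : Int × List (String × String)) => (pvRole p.2, p.1))
          (g := fun (d : PySem.Dict String (List Int)) q => d.modify q.1 [] (· ++ [q.2]))
          (l := PySem.List.enumerate blocks 0) (init := PySem.Dict.empty)).symm]
    rw [PySem.Dict.getD_foldl_modify_append]
    simp [pvGrp_characterize]
  have hnodup : posd.keys.Nodup := by
    rw [hposd]
    exact PySem.Dict.nodup_keys_foldl_modify_key _ _ _ _ _ (by simp)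
  have hall : ∀ g ∈ posd.items, g.2 = pvGrp (blocks.map pvRole) 0 g.1 := by
    rintro ⟨r, v⟩ hg
    have h1 : posd.getD r [] = v := PySem.Dict.getD_of_mem_items posd hg hnodup []
    exact h1.symm.trans (hgetD r)
  have hroleslen : (blocks.map pvRole).length = blocks.length := List.length_map ..
  have hmemkeys : ∀ (i : Nat) (hi : i < blocks.length),
      (blocks.map pvRole)[i]'(by omega) ∈ posd.keys := by
    intro i hi
    rw [hposd, PySem.Dict.keys_foldl_modify_key]
    have hmapkey : (PySem.List.enumerate blocks 0).map (fun p => pvRole p.2)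
        = blocks.map pvRole := by
      rw [show (fun (p : Int × List (String × String)) => pvRole p.2)
            = pvRole ∘ (fun p => p.2) from rfl, ← List.map_map,
        PySem.List.map_snd_enumerate]
    rw [hmapkey]
    simp only [PySem.Dict.keys_empty, PySem.Set.update_nil_left, PySem.Set.mem_ofList]
    exact List.getElem_mem _
  have hmem : ∀ (i : Nat) (hi : i < blocks.length),
      ((blocks.map pvRole)[i]'(by omega),
        pvGrp (blocks.map pvRole) 0 ((blocks.map pvRole)[i]'(by omega))) ∈ posd.items := by
    intro i hi
    rcases hx : posd.get? ((blocks.map pvRole)[i]'(by omega)) with _ | v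
    · exact absurd ((PySem.Dict.get?_eq_none_iff_not_mem_keys posd _).mp hx)
        (not_not_intro (hmemkeys i hi))
    · have hv : v = pvGrp (blocks.map pvRole) 0 ((blocks.map pvRole)[i]'(by omega)) := by
        have h2 := PySem.Dict.getD_of_get?_eq_some posd ([] : List Int) hx
        exact h2.symm.trans (hgetD _)
      exact hv ▸ PySem.Dict.mem_items_of_get?_eq_some posd hx
  set keyat := posd.items.foldl (fun k rp => pvInner rp.1 rp.2 (0 : Int) k)
      (PySem.Dict.empty : PySem.Dict Int String) with hkeyat
  have hK : ∀ (i : Nat) (hi : i < blocks.length),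
      keyat.getD ((i : Nat) : Int) "" =
        pvKey (pvRole blocks[i])
          ((((blocks.take i).map pvRole).count (pvRole blocks[i]) : Nat) : Int) := by
    intro i hi
    have hi' : i < (blocks.map pvRole).length := by omega
    have hget := pvOuter (blocks.map pvRole) i hi' posd.items PySem.Dict.empty hall (hmem i hi)
    rw [hkeyat, PySem.Dict.getD_of_get?_eq_some _ "" hget]
    simp [List.getElem_map, List.map_take]
  show ((PySem.List.enumerate blocks 0).foldl
      (fun (d : PySem.Dict String String) p => d.insert (keyat.getD p.1 "") (pvText p.2))
      PySem.Dict.empty).items = _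
  rw [show (0 : Int) = ((([] : List String).length : Nat) : Int) by simp]
  rw [pvB_final keyat blocks [] PySem.Dict.empty (by
    intro i hi
    simpa using hK i hi)]

-- ===== VERDICT (by name: the statement is the Claim_ definition above) =====
theorem build_keyed_dict_py_spec : Claim_equal_build_keyed_dict_py := by
  intro blocks _
  show build_keyed_dict_py blocks = build_keyed_dict_py_alt blocks
  rw [pvB_eq]
  show (blocks.foldl pvStepA (PySem.Dict.empty, PySem.Dict.empty)).2.items = _
  rw [pvA_main blocks [] _ _ (by intro r; simp)]
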